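-- pv_equiv track=rewrite | github.com/ndoll1998/AppliedTransformers | applied/common/bio.py | build_bio_scheme
-- ===== SOURCE A (Python) =====
-- def build_bio_scheme(token_spans:list, entity_spans:list) -> list:
--
--     # no entities provided
--     if len(entity_spans) == 0:
--         return [0] * len(token_spans)
--
--     # sort entities by occurance in text
--     entity_spans = sorted(entity_spans, key=lambda e: e[0])
--     # create bio-scheme list
--     bio = []
--     entity_id, in_entity = 0, False
--     for tb, te in token_spans:
--         # get entity candidate
--         eb, ee = entity_spans[entity_id]
--         # check if current token is part of an entity
--         if (eb <= tb) and (te <= ee):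
--             if in_entity:
--                 # already in entity
--                 bio.append(2)
--             else:
--                 # new entity
--                 in_entity = True
--                 bio.append(1)
--         else:
--             # out of entity
--             in_entity = False
--             bio.append(0)
--
--     return bio
-- ===== SOURCE B (Python) =====
-- def build_bio_scheme(token_spans: list, entity_spans: list) -> list:
--     # no entities provided
--     if len(entity_spans) == 0:
--         return [0] * len(token_spans)
--     # only the entity with the smallest begin is ever consulted (first one on ties)
--     eb, ee = min(entity_spans, key=lambda e: e[0])
--
--     def inside(t):
--         return eb <= t[0] and t[1] <= ee
--
--     # run-length decomposition: each maximal run of tokens inside the entity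
--     # becomes [1, 2, 2, ...]; every token outside becomes 0
--     out = []
--     i, n = 0, len(token_spans)
--     while i < n:
--         if inside(token_spans[i]):
--             j = i + 1
--             while j < n and inside(token_spans[j]):
--                 j += 1
--             out.extend([1] + [2] * (j - i - 1))
--             i = j
--         else:
--             out.append(0)
--             i += 1
--     return out
-- ===== Notes on version B (the rewrite author's own statement) =====
-- stated objective: alternative
-- what changed: Drops the sort and the stateful in_entity flag: B takes the min-by-start entity once (A only ever reads the sorted list's first element) and emits the output by run-length decomposition - each maximal run of tokens inside the entity becomes [1,2,...,2], tokens outside become 0.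
import Mathlib
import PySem

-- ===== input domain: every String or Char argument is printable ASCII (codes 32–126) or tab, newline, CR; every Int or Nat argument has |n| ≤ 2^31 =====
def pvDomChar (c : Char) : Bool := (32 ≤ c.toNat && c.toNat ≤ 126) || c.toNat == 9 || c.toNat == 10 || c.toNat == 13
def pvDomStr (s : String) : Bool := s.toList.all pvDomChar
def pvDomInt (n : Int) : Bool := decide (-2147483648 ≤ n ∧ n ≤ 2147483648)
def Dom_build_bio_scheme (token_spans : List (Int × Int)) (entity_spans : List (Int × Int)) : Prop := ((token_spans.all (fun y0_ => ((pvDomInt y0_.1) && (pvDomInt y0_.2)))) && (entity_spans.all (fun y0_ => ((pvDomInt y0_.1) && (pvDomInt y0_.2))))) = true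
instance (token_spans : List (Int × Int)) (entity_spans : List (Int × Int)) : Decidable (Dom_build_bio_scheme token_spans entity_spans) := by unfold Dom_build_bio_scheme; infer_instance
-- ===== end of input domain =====

-- B drops A's sort and stateful flag: it takes the min-by-start entity once and emits the
-- output by run-length decomposition (each maximal inside-run becomes [1,2,...,2]); objective: alternative.


-- ===== PORT A =====
-- the for-loop of A: state is in_entity; entity_id stays 0, so each iteration reads
-- es[0] (the 'none' branch is Python's IndexError, unreachable because es ≠ []).
def bioLoopA (es : List (Int × Int)) (in_entity : Bool) : List (Int × Int) → List Int
  | [] => []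
  | (tb, te) :: rest =>
    match PySem.List.pyGet? es 0 with
    | none => []
    | some (eb, ee) =>
      if eb ≤ tb ∧ te ≤ ee then
        (if in_entity then (2 : Int) else 1) :: bioLoopA es true rest
      else (0 : Int) :: bioLoopA es false rest

def build_bio_scheme (token_spans : List (Int × Int)) (entity_spans : List (Int × Int)) : List Int :=
  if entity_spans.length = 0 then List.replicate token_spans.length 0
  else
    bioLoopA (PySem.List.sorted entity_spans (fun e => e.1) false) false token_spans

-- ===== PORT B =====
-- B's while loop over indices i..j: each maximal run of inside-tokens yields 1 :: replicate 2,
-- an outside token yields 0; ported as the equivalent structural recursion via takeWhile/dropWhile.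
def bioRuns (inside : (Int × Int) → Bool) : List (Int × Int) → List Int
  | [] => []
  | t :: rest =>
    if inside t then
      (1 : Int) :: (List.replicate (rest.takeWhile inside).length 2 ++ bioRuns inside (rest.dropWhile inside))
    else (0 : Int) :: bioRuns inside rest
  termination_by ts => ts.length
  decreasing_by
  · simpa using Nat.lt_succ_of_le (List.length_dropWhile_le inside rest)
  · simp

def build_bio_scheme_alt (token_spans : List (Int × Int)) (entity_spans : List (Int × Int)) : List Int :=
  if entity_spans.length = 0 then List.replicate token_spans.length 0
  else
    match PySem.List.min? entity_spans (fun e => e.1) with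
    | none => []  -- unreachable: entity_spans ≠ []
    | some (eb, ee) =>
      bioRuns (fun t => decide (eb ≤ t.1) && decide (t.2 ≤ ee)) token_spans

-- ===== PRECONDITION & SPEC =====
def Spec_build_bio_scheme (token_spans : List (Int × Int)) (entity_spans : List (Int × Int)) (out : List Int) : Prop := out = build_bio_scheme_alt token_spans entity_spans
instance (token_spans : List (Int × Int)) (entity_spans : List (Int × Int)) (out : List Int) : Decidable (Spec_build_bio_scheme token_spans entity_spans out) := by unfold Spec_build_bio_scheme; infer_instance

-- ===== CLAIM (what is proved, stated in full; the proofs are below) =====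
def Claim_equal_build_bio_scheme : Prop := ∀ (token_spans : List (Int × Int)) (entity_spans : List (Int × Int)), Dom_build_bio_scheme token_spans entity_spans → Spec_build_bio_scheme token_spans entity_spans (build_bio_scheme token_spans entity_spans)

-- ===== LEMMAS AND PROOFS =====

-- head of an insertBy step, expressed as one min step
theorem head_insertBy (key : (Int × Int) → Int) (x : Int × Int) (ys : List (Int × Int)) :
    (PySem.List.insertBy (fun a b => decide (key a < key b)) x ys).head? =
      some (match ys.head? with
            | none => x
            | some m => if key x < key m then x else m) := by
  cases ys with
  | nil => simp [PySem.List.insertBy]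
  | cons y ys =>
    simp only [PySem.List.insertBy, List.head?]
    split_ifs with h <;> simp_all

-- the head of the insertion-sort foldl is the first-min foldl
theorem head_foldl_insertBy (key : (Int × Int) → Int)
    (f : Option (Int × Int) → (Int × Int) → Option (Int × Int))
    (hf : ∀ acc x, f acc x = match acc with
      | none => some x
      | some m => if key x < key m then some x else some m)
    (xs ys : List (Int × Int)) :
    (xs.foldl (fun acc x => PySem.List.insertBy (fun a b => decide (key a < key b)) x acc) ys).head? =
      xs.foldl f ys.head? := by
  induction xs generalizing ys with
  | nil => rfl
  | cons x xs ih =>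
    simp only [List.foldl]
    rw [ih, head_insertBy, hf]
    cases h : ys.head? with
    | none => rfl
    | some v => by_cases hk : key x < key v <;> simp [hk]

-- head of sorted equals min? (stable sort: head = first element of minimal key)
theorem head_sorted_eq_min? (key : (Int × Int) → Int) (xs : List (Int × Int)) :
    (PySem.List.sorted xs key false).head? = PySem.List.min? xs key := by
  rw [PySem.List.sorted_eq_foldl_insertBy]
  unfold PySem.List.min?
  have h := head_foldl_insertBy key _ (fun acc x => rfl) xs []
  rw [List.head?] at h
  rw [h]
  apply List.foldl_ext
  intro a x _
  cases a <;> rfl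

-- A's loop equals B's run decomposition: the false-state loop is bioRuns, and the
-- true-state loop is the tail of a run (2s over the takeWhile prefix, then bioRuns).
theorem loop_eq_runs (es : List (Int × Int)) (eb ee : Int)
    (h : PySem.List.pyGet? es 0 = some (eb, ee)) :
    ∀ (ts : List (Int × Int)),
      bioLoopA es false ts = bioRuns (fun t => decide (eb ≤ t.1) && decide (t.2 ≤ ee)) ts ∧
      bioLoopA es true ts =
        List.replicate ((ts.takeWhile (fun t => decide (eb ≤ t.1) && decide (t.2 ≤ ee))).length) 2 ++
          bioRuns (fun t => decide (eb ≤ t.1) && decide (t.2 ≤ ee)) (ts.dropWhile (fun t => decide (eb ≤ t.1) && decide (t.2 ≤ ee))) := by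
  intro ts
  induction ts with
  | nil => exact ⟨by simp [bioLoopA, bioRuns], by simp [bioLoopA, bioRuns]⟩
  | cons t ts ih =>
    obtain ⟨tb, te⟩ := t
    by_cases hc : eb ≤ tb ∧ te ≤ ee
    · obtain ⟨h1, h2⟩ := hc
      refine ⟨?_, ?_⟩ <;>
        simp [bioLoopA, h, bioRuns, h1, h2, List.replicate_succ, ih.2]
    · refine ⟨?_, ?_⟩ <;>
        rcases not_and_or.mp hc with h1 | h1 <;>
        simp [bioLoopA, h, bioRuns, h1, ih.1]

theorem pyGet?_zero_head (l : List (Int × Int)) (hx : l ≠ []) :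
    PySem.List.pyGet? l 0 = l.head? := by
  cases l with
  | nil => simp at hx
  | cons a t => simp [PySem.List.pyGet?, PySem.List.pyIdx?]

-- ===== VERDICT (by name: the statement is the Claim_ definition above) =====
theorem build_bio_scheme_spec : Claim_equal_build_bio_scheme := by
  intro ts es _
  unfold Spec_build_bio_scheme build_bio_scheme build_bio_scheme_alt
  by_cases h0 : es.length = 0
  · simp [h0]
  · have hne : es ≠ [] := by
      intro h; exact h0 (by simp [h])
    have hsne : PySem.List.sorted es (fun e => e.1) false ≠ [] := by
      simpa [PySem.List.sorted_eq_nil_iff] using hne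
    have hhead := head_sorted_eq_min? (fun e => e.1) es
    rw [if_neg h0, if_neg h0]
    cases hmin : PySem.List.min? es (fun e => e.1) with
    | none =>
      have : (PySem.List.sorted es (fun e => e.1) false).head? = none := by rw [hhead, hmin]
      exact absurd (List.head?_eq_none_iff.mp this) hsne
    | some m =>
      obtain ⟨eb, ee⟩ := m
      have hget : PySem.List.pyGet? (PySem.List.sorted es (fun e => e.1) false) 0 = some (eb, ee) := by
        rw [pyGet?_zero_head _ hsne, hhead, hmin]
      exact (loop_eq_runs _ eb ee hget ts).1
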